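-- pv_equiv track=rewrite | github.com/ItsAhmedAtef/FLAWS | flaws_utils.py | is_valid_subdomain_name_or_chain
-- ===== SOURCE A (Python) =====
-- lower_chars   = 'abcdefghijklmnopqrstuvwxyz'
--
-- numbers       = '0123456789'
--
-- def is_valid_subdomain_name_or_chain( name_or_chain ):
--     for part in name_or_chain.split('.'):
--         if not part or part.startswith('-') or part.endswith('-'):
--             return False
--
--         for char in part:
--             if char not in lower_chars + numbers + '-':
--                 return False
--     return True
-- ===== SOURCE B (Python) =====
-- _ALLOWED = 'abcdefghijklmnopqrstuvwxyz0123456789'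
--
-- def is_valid_subdomain_name_or_chain(name_or_chain):
--     # single left-to-right scan: prev tracks the previous character,
--     # with a dot acting as the virtual boundary before the first label
--     prev = '.'
--     for ch in name_or_chain:
--         if ch == '.':
--             if prev == '.' or prev == '-':
--                 return False
--         elif ch == '-':
--             if prev == '.':
--                 return False
--         elif ch not in _ALLOWED:
--             return False
--         prev = ch
--     return prev != '.' and prev != '-'
-- ===== Notes on version B (the rewrite author's own statement) =====
-- stated objective: simpler
-- what changed: Replaces A's split-on-dot plus nested per-part character loop (with per-part startswith/endswith checks) by a single left-to-right scan over the whole string that only remembers the previous character, with a dot as the virtual boundary before the first label.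
import Mathlib
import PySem

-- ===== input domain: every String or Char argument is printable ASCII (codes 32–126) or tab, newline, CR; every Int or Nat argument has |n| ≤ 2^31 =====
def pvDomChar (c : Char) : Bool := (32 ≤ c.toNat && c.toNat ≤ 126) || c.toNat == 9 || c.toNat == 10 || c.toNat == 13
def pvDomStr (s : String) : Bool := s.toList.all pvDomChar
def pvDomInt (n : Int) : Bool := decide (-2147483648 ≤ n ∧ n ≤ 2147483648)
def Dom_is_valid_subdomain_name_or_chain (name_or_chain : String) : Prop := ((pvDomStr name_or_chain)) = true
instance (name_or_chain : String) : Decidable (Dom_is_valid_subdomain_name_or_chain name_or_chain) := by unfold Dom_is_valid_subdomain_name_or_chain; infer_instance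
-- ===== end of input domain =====

-- B replaces A's split-into-parts plus nested per-part character loop by a single
-- left-to-right scan that remembers only the previous character (objective: simpler).

-- ===== PORT A =====
def lower_chars : String := "abcdefghijklmnopqrstuvwxyz"
def numbers : String := "0123456789"

-- inner loop: 'for char in part: if char not in lower_chars + numbers + "-": return False'
def pvInnerA : List Char → Bool
  | [] => true
  | c :: cs =>
    if PySem.Chars.isIn [c] (lower_chars ++ numbers ++ "-").toList then pvInnerA cs else false

-- outer loop over name_or_chain.split('.')
def pvOuterA : List (List Char) → Bool
  | [] => true
  | p :: ps =>
    if p.isEmpty || PySem.Chars.startswith p ['-'] || PySem.Chars.endswith p ['-'] then false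
    else if pvInnerA p then pvOuterA ps else false

def is_valid_subdomain_name_or_chain (name_or_chain : String) : Bool :=
  pvOuterA (PySem.Chars.splitOn name_or_chain.toList ['.'])

-- ===== PORT B =====
def pvAllowed : String := "abcdefghijklmnopqrstuvwxyz0123456789"   -- _ALLOWED

-- Source B's scan: prev is the previous character, a dot the virtual boundary before the start
def pvScanB : Char → List Char → Bool
  | prev, [] => !(prev == '.') && !(prev == '-')
  | prev, c :: cs =>
    if c = '.' then
      if prev = '.' || prev = '-' then false else pvScanB c cs
    else if c = '-' then
      if prev = '.' then false else pvScanB c cs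
    else if PySem.Chars.isIn [c] pvAllowed.toList then pvScanB c cs
    else false

def is_valid_subdomain_name_or_chain_alt (name_or_chain : String) : Bool :=
  pvScanB '.' name_or_chain.toList

-- ===== PRECONDITION & SPEC =====
def Spec_is_valid_subdomain_name_or_chain (name_or_chain : String) (out : Bool) : Prop := out = is_valid_subdomain_name_or_chain_alt name_or_chain
instance (name_or_chain : String) (out : Bool) : Decidable (Spec_is_valid_subdomain_name_or_chain name_or_chain out) := by unfold Spec_is_valid_subdomain_name_or_chain; infer_instance

-- ===== CLAIM (what is proved, stated in full; the proofs are below) =====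
def Claim_equal_is_valid_subdomain_name_or_chain : Prop := ∀ (name_or_chain : String), Dom_is_valid_subdomain_name_or_chain name_or_chain → Spec_is_valid_subdomain_name_or_chain name_or_chain (is_valid_subdomain_name_or_chain name_or_chain)

-- ===== LEMMAS AND PROOFS =====

-- a structural recursion equal to splitOn on '.' (proved below)
def pvSplitRec (pre : List Char) : List Char → List (List Char)
  | [] => [pre]
  | c :: rest => if c = '.' then pre :: pvSplitRec [] rest else pvSplitRec (pre ++ [c]) rest

theorem pvGo_cons (fuel : Nat) (c : Char) (rest cur : List Char) (acc : List (List Char)) :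
    PySem.Chars.splitOn.go ['.'] (fuel+1) (c :: rest) cur acc =
      if c = '.' then PySem.Chars.splitOn.go ['.'] fuel rest [] (cur.reverse :: acc)
      else PySem.Chars.splitOn.go ['.'] fuel rest (c :: cur) acc := by
  rw [PySem.Chars.splitOn.go.eq_def]
  by_cases hc : c = '.'
  · simp [hc, List.isPrefixOf]
  · simp [hc, List.isPrefixOf]
    exact fun h => absurd h.symm hc

theorem pvGo_nil (fuel : Nat) (cur : List Char) (acc : List (List Char)) :
    PySem.Chars.splitOn.go ['.'] (fuel+1) [] cur acc = (cur.reverse :: acc).reverse := by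
  rw [PySem.Chars.splitOn.go.eq_def]

theorem pvGo_spec (l : List Char) : ∀ (fuel : Nat) (cur : List Char) (acc : List (List Char)),
    l.length < fuel →
    PySem.Chars.splitOn.go ['.'] fuel l cur acc = acc.reverse ++ pvSplitRec cur.reverse l := by
  induction l with
  | nil =>
    intro fuel cur acc h
    cases fuel with
    | zero => omega
    | succ f => simp [pvGo_nil, pvSplitRec]
  | cons c rest ih =>
    intro fuel cur acc h
    cases fuel with
    | zero => omega
    | succ f =>
      rw [pvGo_cons]
      by_cases hc : c = '.'
      · simp [hc, pvSplitRec, ih f [] (cur.reverse :: acc) (by simpa using h)]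
      · simp only [hc, if_neg, pvSplitRec, if_false,
          ih f (c :: cur) acc (by simpa using h), List.reverse_cons]

theorem pvSplitOn_eq (l : List Char) :
    PySem.Chars.splitOn l ['.'] = pvSplitRec [] l := by
  simpa using pvGo_spec l (l.length + 1) [] [] (by omega)

theorem pvIsIn_singleton (c : Char) (l : List Char) :
    PySem.Chars.isIn [c] l = l.contains c := by
  rw [Bool.eq_iff_iff, PySem.Chars.isIn_iff_infix, List.contains_iff_mem]
  constructor
  · intro h; simpa using h.sublist.subset (List.mem_singleton_self c)
  · intro h
    obtain ⟨s, t, hst⟩ := List.append_of_mem h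
    exact ⟨s, t, by rw [hst]; simp⟩

-- the two character classes, abbreviated
def pvAllowedA (c : Char) : Bool := PySem.Chars.isIn [c] (lower_chars ++ numbers ++ "-").toList
def pvAllowedB (c : Char) : Bool := PySem.Chars.isIn [c] pvAllowed.toList

theorem pvAllowedA_eq (c : Char) : pvAllowedA c = (pvAllowedB c || c == '-') := by
  have h : (lower_chars ++ numbers ++ "-").toList = pvAllowed.toList ++ ['-'] := rfl
  simp [pvAllowedA, pvAllowedB, pvIsIn_singleton, h, Bool.beq_eq_decide_eq]

theorem pvAllowedB_ne_dot {c : Char} (h : pvAllowedB c = true) : c ≠ '.' := by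
  intro hc; subst hc; revert h; decide

theorem pvInnerA_append (pre : List Char) (c : Char) :
    pvInnerA (pre ++ [c]) = (pvInnerA pre && pvAllowedA c) := by
  induction pre with
  | nil => simp [pvInnerA, pvAllowedA]
  | cons d ds ih =>
    simp only [List.cons_append, pvInnerA]
    split <;> simp [ih]

theorem pvInnerA_getLast {pre : List Char} {c : Char} (hne : pre ≠ [])
    (h : pvInnerA pre = true) (hl : pre.getLast?.getD '.' = c) : pvAllowedA c = true := by
  induction pre with
  | nil => exact absurd rfl hne
  | cons d ds ih =>
    by_cases hds : ds = []
    · subst hds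
      simp only [pvInnerA] at h
      simp only [List.getLast?_singleton, Option.getD_some] at hl
      subst hl
      revert h; unfold pvAllowedA; split <;> simp_all
    · have h' : pvInnerA ds = true := by
        revert h; simp only [pvInnerA]; split <;> simp_all
      have hl' : ds.getLast?.getD '.' = c := by
        cases ds with
        | nil => exact absurd rfl hds
        | cons e es => simpa only [List.getLast?_cons_cons] using hl
      exact ih hds h' hl'

theorem pvStartswith_dash (p : List Char) :
    PySem.Chars.startswith p ['-'] = (p.head? == some '-') := by
  rw [Bool.eq_iff_iff, PySem.Chars.startswith_iff]
  cases p with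
  | nil => simp
  | cons c cs =>
    rw [List.cons_prefix_cons]
    constructor
    · rintro ⟨rfl, -⟩; simp
    · intro h
      simp only [List.head?_cons, beq_iff_eq, Option.some.injEq] at h
      exact ⟨h.symm, List.nil_prefix⟩

theorem pvSingleton_suffix (p : List Char) (a : Char) : ([a] <:+ p) ↔ p.getLast? = some a := by
  rw [List.getLast?_eq_some_iff]
  constructor
  · rintro ⟨t, rfl⟩; exact ⟨t, rfl⟩
  · rintro ⟨t, rfl⟩; exact ⟨t, rfl⟩

theorem pvEndswith_dash (p : List Char) :
    PySem.Chars.endswith p ['-'] = (p.getLast?.getD '.' == '-' && !p.isEmpty) := by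
  rw [Bool.eq_iff_iff, PySem.Chars.endswith_iff, pvSingleton_suffix]
  cases p with
  | nil => simp
  | cons c cs =>
    cases h : (c :: cs).getLast? with
    | none => rw [List.getLast?_eq_none_iff] at h; simp at h
    | some x => simp [h]

-- a part already known bad makes the whole result False whatever follows
theorem pvPart_bad {pre : List Char} (h : pre.head? = some '-' ∨ pvInnerA pre = false)
    (X : List (List Char)) : pvOuterA (pre :: X) = false := by
  simp only [pvOuterA]
  rcases h with h | h
  · rw [pvStartswith_dash, h]; simp
  · split
    · rfl
    · simp [h]

theorem pvBad (l : List Char) : ∀ (pre : List Char),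
    (pre.head? = some '-' ∨ pvInnerA pre = false) → pvOuterA (pvSplitRec pre l) = false := by
  induction l with
  | nil => intro pre h; exact pvPart_bad h []
  | cons c rest ih =>
    intro pre h
    have hne : pre ≠ [] := by
      rintro rfl
      rcases h with h | h
      · simp at h
      · simp [pvInnerA] at h
    by_cases hc : c = '.'
    · subst hc; simp only [pvSplitRec, if_pos rfl]; exact pvPart_bad h _
    · simp only [pvSplitRec, if_neg hc]
      apply ih
      rcases h with h | h
      · left; cases pre with
        | nil => exact absurd rfl hne
        | cons d ds => simpa using h
      · right; rw [pvInnerA_append, h]; rfl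

-- main invariant: scanning the rest with prev = the last accepted character (a dot at a part start)
theorem pvKey (l : List Char) : ∀ (pre : List Char),
    (pre = [] ∨ (pre.head? ≠ some '-' ∧ pvInnerA pre = true)) →
    pvOuterA (pvSplitRec pre l) = pvScanB (pre.getLast?.getD '.') l := by
  induction l with
  | nil =>
    intro pre hg
    by_cases hpe : pre = []
    · subst hpe; simp [pvSplitRec, pvOuterA, pvScanB]
    · obtain ⟨hh, hin⟩ := hg.resolve_left hpe
      have hall : pvAllowedA (pre.getLast?.getD '.') = true := pvInnerA_getLast hpe hin rfl
      have hdot : pre.getLast?.getD '.' ≠ '.' := by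
        intro h; rw [h] at hall; revert hall; decide
      have hh' : (pre.head? == some '-') = false := by simpa using hh
      by_cases hd : pre.getLast?.getD '.' = '-'
      · simp [pvSplitRec, pvOuterA, pvStartswith_dash, pvEndswith_dash, pvScanB, hd, hpe,
          List.isEmpty_iff]
      · simp [pvSplitRec, pvOuterA, pvStartswith_dash, pvEndswith_dash, pvScanB, hd, hpe, hh',
          hin, hdot, List.isEmpty_iff]
  | cons c rest ih =>
    intro pre hg
    by_cases hc : c = '.'
    · subst hc
      simp only [pvSplitRec, if_pos rfl]
      by_cases hpe : pre = []
      · subst hpe; simp [pvOuterA, pvScanB]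
      · obtain ⟨hh, hin⟩ := hg.resolve_left hpe
        have hall : pvAllowedA (pre.getLast?.getD '.') = true := pvInnerA_getLast hpe hin rfl
        have hdot : pre.getLast?.getD '.' ≠ '.' := by
          intro h; rw [h] at hall; revert hall; decide
        have hh' : (pre.head? == some '-') = false := by simpa using hh
        by_cases hd : pre.getLast?.getD '.' = '-'
        · simp [pvOuterA, pvStartswith_dash, pvEndswith_dash, pvScanB, hd, hpe, hdot,
            List.isEmpty_iff]
        · simp [pvOuterA, pvStartswith_dash, pvEndswith_dash, pvScanB, hd, hpe, hh', hin, hdot,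
            List.isEmpty_iff, ih [] (Or.inl rfl)]
    · simp only [pvSplitRec, if_neg hc]
      by_cases hdash : c = '-'
      · subst hdash
        by_cases hpe : pre = []
        · subst hpe
          simp only [List.nil_append]
          rw [pvBad rest ['-'] (Or.inl rfl)]
          simp [pvScanB]
        · obtain ⟨hh, hin⟩ := hg.resolve_left hpe
          have hall : pvAllowedA (pre.getLast?.getD '.') = true := pvInnerA_getLast hpe hin rfl
          have hdot : pre.getLast?.getD '.' ≠ '.' := by
            intro h; rw [h] at hall; revert hall; decide
          have hgood : pre ++ ['-'] = [] ∨ ((pre ++ ['-']).head? ≠ some '-' ∧ pvInnerA (pre ++ ['-']) = true) := by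
            right
            refine ⟨?_, ?_⟩
            · cases pre with
              | nil => exact absurd rfl hpe
              | cons d ds => simpa using hh
            · rw [pvInnerA_append, hin]; decide
          rw [ih (pre ++ ['-']) hgood]
          simp [pvScanB, hdot, List.getLast?_concat]
      · by_cases hB : pvAllowedB c = true
        · have hcd : c ≠ '.' := pvAllowedB_ne_dot hB
          have hgood : pre ++ [c] = [] ∨ ((pre ++ [c]).head? ≠ some '-' ∧ pvInnerA (pre ++ [c]) = true) := by
            right
            refine ⟨?_, ?_⟩
            · cases pre with
              | nil => simpa using hdash
              | cons d ds =>
                have := hg.resolve_left (by simp)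
                simpa using this.1
            · rw [pvInnerA_append, pvAllowedA_eq, hB]
              by_cases hpe : pre = []
              · subst hpe; simp [pvInnerA]
              · simp [(hg.resolve_left hpe).2]
          rw [ih (pre ++ [c]) hgood]
          by_cases hpe : pre = []
          · subst hpe
            simp only [pvScanB, if_neg hc, if_neg hdash]
            unfold pvAllowedB at hB
            simp [hB]
          · obtain ⟨hh, hin⟩ := hg.resolve_left hpe
            have hall : pvAllowedA (pre.getLast?.getD '.') = true := pvInnerA_getLast hpe hin rfl
            have hdot : pre.getLast?.getD '.' ≠ '.' := by
              intro h; rw [h] at hall; revert hall; decide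
            simp only [pvScanB, if_neg hc, if_neg hdash]
            rw [List.getLast?_concat]
            unfold pvAllowedB at hB
            simp [hB]
        · have hAfalse : pvAllowedA c = false := by
            rw [pvAllowedA_eq]
            simp [Bool.eq_false_iff.mpr hB, hdash]
          rw [pvBad rest (pre ++ [c]) (Or.inr (by rw [pvInnerA_append, hAfalse]; simp))]
          by_cases hpe : pre = []
          · subst hpe
            simp only [pvScanB, if_neg hc, if_neg hdash]
            unfold pvAllowedB at hB
            simp [Bool.eq_false_iff.mpr hB]
          · obtain ⟨hh, hin⟩ := hg.resolve_left hpe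
            have hall : pvAllowedA (pre.getLast?.getD '.') = true := pvInnerA_getLast hpe hin rfl
            have hdot : pre.getLast?.getD '.' ≠ '.' := by
              intro h; rw [h] at hall; revert hall; decide
            simp only [pvScanB, if_neg hc, if_neg hdash]
            unfold pvAllowedB at hB
            simp [Bool.eq_false_iff.mpr hB]

-- ===== VERDICT (by name: the statement is the Claim_ definition above) =====
theorem is_valid_subdomain_name_or_chain_spec : Claim_equal_is_valid_subdomain_name_or_chain := by
  intro s _
  unfold Spec_is_valid_subdomain_name_or_chain is_valid_subdomain_name_or_chain
    is_valid_subdomain_name_or_chain_alt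
  rw [pvSplitOn_eq, pvKey s.toList [] (Or.inl rfl)]
  rfl
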